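-- pv_equiv track=rewrite | github.com/shubiduba1212/Coding_Basic | 프로그래머스/0/120896. 한 번만 등장한 문자/한 번만 등장한 문자.py | solution
-- ===== SOURCE A (Python) =====
-- def solution(s):
--     answer = ''
--     temp = []
--
--     for i in range(len(s)) :
--         if s.count(s[i : i + 1]) == 1 :
--             temp.append(s[i : i + 1])
--
--     temp.sort()
--
--     for i in temp :
--         answer += i
--
--     return answer
-- ===== SOURCE B (Python) =====
-- def solution(s):
--     # Sort first, then one pass over runs of equal characters: keep the runs of length 1.
--     t = sorted(s)
--     out = []
--     while t:
--         c = t[0]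
--         k = 1
--         while k < len(t) and t[k] == c:
--             k += 1
--         if k == 1:
--             out.append(c)
--         del t[:k]
--     return ''.join(out)
-- ===== Notes on version B (the rewrite author's own statement) =====
-- stated objective: faster
-- what changed: Replaces A's per-index global s.count scan (quadratic) plus a separate sort of the survivors by sort-first-then-one-grouping-pass over runs of equal characters, keeping runs of length 1.
import Mathlib
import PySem

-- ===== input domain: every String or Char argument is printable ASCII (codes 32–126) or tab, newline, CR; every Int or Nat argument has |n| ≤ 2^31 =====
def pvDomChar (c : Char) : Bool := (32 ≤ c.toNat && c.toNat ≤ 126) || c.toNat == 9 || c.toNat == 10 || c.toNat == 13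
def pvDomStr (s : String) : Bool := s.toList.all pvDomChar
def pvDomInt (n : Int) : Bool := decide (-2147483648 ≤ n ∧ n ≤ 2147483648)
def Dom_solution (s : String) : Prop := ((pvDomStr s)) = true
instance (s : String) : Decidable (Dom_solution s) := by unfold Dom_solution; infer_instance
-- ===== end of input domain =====

-- B sorts first and keeps the length-1 runs in one grouping pass, instead of A's per-index
-- global s.count scan followed by a sort of the survivors; the two return values agree.

-- ===== PORT A =====
def solution (s : String) : String :=
  let temp := (PySem.List.pyRange 0 (PySem.Str.len s) 1).foldl
    (fun temp i =>
      if PySem.Str.count s (PySem.Str.slice s (some i) (some (i + 1))) == 1 then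
        temp ++ [PySem.Str.slice s (some i) (some (i + 1))]
      else temp) ([] : List String)
  let temp2 := PySem.List.sorted temp (fun x => x) false
  temp2.foldl (fun answer i => answer ++ i) ""

-- ===== PORT B =====
-- the outer while-loop of Source B: consume one run of equal characters per step
def solutionAltGo (t : List Char) (out : List Char) : List Char :=
  match t with
  | [] => out
  | c :: rest =>
    let k := 1 + (rest.takeWhile (fun x => x == c)).length
    solutionAltGo ((c :: rest).drop k) (if k == 1 then out ++ [c] else out)
termination_by t.length
decreasing_by simp

def solution_alt (s : String) : String :=
  String.ofList (solutionAltGo (PySem.List.sorted s.toList (fun x => x) false) [])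

-- ===== PRECONDITION & SPEC =====
def Spec_solution (s : String) (out : String) : Prop := out = solution_alt s
instance (s : String) (out : String) : Decidable (Spec_solution s out) := by unfold Spec_solution; infer_instance

-- ===== CLAIM (what is proved, stated in full; the proofs are below) =====
def Claim_equal_solution : Prop := ∀ (s : String), Dom_solution s → Spec_solution s (solution s)

-- ===== LEMMAS AND PROOFS =====

-- Python s.count(sub) for a one-character sub is the character count
lemma count_go_singleton (c : Char) : ∀ (l : List Char) (fuel acc : Nat), l.length ≤ fuel →
    PySem.Chars.count.go [c] fuel l acc = acc + l.count c := by
  intro l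
  induction l with
  | nil => intro fuel acc _; cases fuel <;> simp [PySem.Chars.count.go]
  | cons h t ih =>
    intro fuel acc hle
    cases fuel with
    | zero => simp at hle
    | succ f =>
      rw [List.length_cons] at hle
      simp only [PySem.Chars.count.go, List.isPrefixOf]
      by_cases hc : c = h
      · subst hc
        simp only [BEq.rfl, Bool.true_and, if_true, List.length_singleton,
          List.drop_succ_cons, List.drop_zero]
        rw [ih f (acc + 1) (by omega)]
        simp
        omega
      · have hbe : (c == h) = false := by simp [hc]
        simp only [hbe, Bool.false_and]
        rw [ih f acc (by omega)]
        simp [Ne.symm hc]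

lemma chars_count_singleton (cs : List Char) (c : Char) :
    PySem.Chars.count cs [c] = cs.count c := by
  simp [PySem.Chars.count, count_go_singleton c cs cs.length 0 le_rfl]

-- A's index loop is a filter-and-map over the characters
lemma foldA {β : Type} (q : List Char → Bool) (g : List Char → β) :
    ∀ (cs : List Char) (acc : List β),
    (List.range cs.length).foldl
      (fun acc i => if q ((cs.drop i).take 1) then acc ++ [g ((cs.drop i).take 1)] else acc) acc
    = acc ++ (cs.filter (fun c => q [c])).map (fun c => g [c]) := by
  intro cs
  induction cs with
  | nil => intro acc; simp
  | cons a t ih =>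
    intro acc
    rw [List.length_cons, List.range_succ_eq_map, List.foldl_cons, List.foldl_map]
    simp only [List.drop_zero, List.take_succ_cons, List.take_zero, List.drop_succ_cons]
    rw [ih]
    by_cases hq : q [a] <;> simp [hq]

lemma foldl_strAppend_toList : ∀ (l : List String) (acc : String),
    (l.foldl (fun a b => a ++ b) acc).toList = acc.toList ++ (l.map String.toList).flatten := by
  intro l
  induction l with
  | nil => intro acc; simp
  | cons h t ih => intro acc; simp [ih, String.toList_append]

lemma flatten_map_singleton : ∀ (l : List Char), (l.map (fun c => [c])).flatten = l := by
  intro l; induction l with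
  | nil => simp
  | cons a t ih => simp [ih]

lemma singleton_str_lt {a b : Char} (h : a < b) :
    String.ofList [a] < String.ofList [b] := by
  rw [String.lt_iff_toList_lt]; simpa using List.Lex.rel h

lemma str_slice_singleton (s : String) (i : Nat) :
    PySem.Str.slice s (some (i : Int)) (some ((i : Int) + 1))
    = String.ofList ((s.toList.drop i).take 1) := by
  apply String.toList_inj.mp
  rw [PySem.Str.toList_slice, String.toList_ofList]
  simp only [PySem.Chars.slice_eq_listSlice]
  have : ((i : Int) + 1) = ((i + 1 : Nat) : Int) := by push_cast; ring
  rw [this]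
  simpa using PySem.List.slice_natCast (xs := s.toList) (a := i) (b := i + 1)

lemma drop_takeWhile_length (p : Char → Bool) (l : List Char) :
    l.drop (l.takeWhile p).length = l.dropWhile p := by
  induction l with
  | nil => simp
  | cons a t ih => by_cases h : p a <;> simp [h, ih]

-- in a sorted list, everything after the first run of the head is strictly larger
lemma run_facts (c : Char) (rest : List Char)
    (hp : (c :: rest).Pairwise (· ≤ ·)) :
    ∀ x ∈ rest.dropWhile (fun x => x == c), c < x := by
  intro x hx
  have hle : ∀ y ∈ rest, c ≤ y := (List.pairwise_cons.mp hp).1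
  have hpr : (rest.dropWhile (fun x => x == c)).Pairwise (· ≤ ·) :=
    ((List.pairwise_cons.mp hp).2).sublist (List.dropWhile_sublist _)
  rcases hcase : rest.dropWhile (fun x => x == c) with _ | ⟨d, tl⟩
  · rw [hcase] at hx; simp at hx
  · have hne : rest.dropWhile (fun x => x == c) ≠ [] := by rw [hcase]; simp
    have hd_ne : (((rest.dropWhile (fun x => x == c)).head hne) == c) = false :=
      List.head_dropWhile_not (fun x => x == c) hne
    have hdhead : (rest.dropWhile (fun x => x == c)).head hne = d := by
      simp [hcase]
    rw [hdhead] at hd_ne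
    have hdmem : d ∈ rest := (List.dropWhile_sublist _).subset (by rw [hcase]; simp)
    have hdc : c < d := by
      refine lt_of_le_of_ne (hle d hdmem) ?_
      intro h; subst h; simp at hd_ne
    rw [hcase] at hx hpr
    rcases List.mem_cons.mp hx with h | h
    · subst h; exact hdc
    · exact lt_of_lt_of_le hdc ((List.pairwise_cons.mp hpr).1 x h)

-- B's grouping loop on a sorted list keeps exactly the characters of count 1
lemma altGo_aux : ∀ (n : Nat) (t : List Char), t.length ≤ n → t.Pairwise (· ≤ ·) →
    ∀ (out : List Char),
    solutionAltGo t out = out ++ t.filter (fun c => t.count c == 1) := by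
  intro n
  induction n with
  | zero =>
    intro t ht _ out
    have : t = [] := List.eq_nil_of_length_eq_zero (by omega)
    subst this; simp [solutionAltGo]
  | succ n ih =>
    intro t ht hp out
    match t with
    | [] => simp [solutionAltGo]
    | c :: rest =>
      have htw : rest.takeWhile (fun x => x == c)
          = List.replicate (rest.takeWhile (fun x => x == c)).length c := by
        rw [List.eq_replicate_iff]
        exact ⟨rfl, fun b hb => by simpa using List.mem_takeWhile_imp hb⟩
      have hsplit : rest = List.replicate (rest.takeWhile (fun x => x == c)).length c
          ++ rest.dropWhile (fun x => x == c) := by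
        conv_lhs => rw [← List.takeWhile_append_dropWhile (p := fun x => x == c) (l := rest)]
        rw [← htw]
      have hdrop : (c :: rest).drop (1 + (rest.takeWhile (fun x => x == c)).length)
          = rest.dropWhile (fun x => x == c) := by
        rw [Nat.add_comm, List.drop_succ_cons, drop_takeWhile_length]
      have hgt := run_facts c rest hp
      have hnotin : c ∉ rest.dropWhile (fun x => x == c) := fun h => lt_irrefl c (hgt c h)
      have hcount_r' : (rest.dropWhile (fun x => x == c)).count c = 0 :=
        List.count_eq_zero.mpr hnotin
      have hcount_c : (c :: rest).count c = 1 + (rest.takeWhile (fun x => x == c)).length := by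
        conv_lhs => rw [hsplit]
        simp [List.count_append, hcount_r']
        omega
      have hcount_x : ∀ x ∈ rest.dropWhile (fun x => x == c),
          (c :: rest).count x = (rest.dropWhile (fun x => x == c)).count x := by
        intro x hx
        have hxc : x ≠ c := fun h => by subst h; exact hnotin hx
        conv_lhs => rw [hsplit]
        simp [List.count_append, List.count_replicate, Ne.symm hxc]
      have hfilter_r' : (rest.dropWhile (fun x => x == c)).filter
            (fun e => (c :: rest).count e == 1)
          = (rest.dropWhile (fun x => x == c)).filter
              (fun e => (rest.dropWhile (fun x => x == c)).count e == 1) := by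
        apply List.filter_congr
        intro x hx
        rw [hcount_x x hx]
      have hpr' : (rest.dropWhile (fun x => x == c)).Pairwise (· ≤ ·) :=
        ((List.pairwise_cons.mp hp).2).sublist (List.dropWhile_sublist _)
      have hlen : (rest.dropWhile (fun x => x == c)).length ≤ n := by
        have h1 := (List.dropWhile_sublist (l := rest) (fun x => x == c)).length_le
        have h2 : rest.length + 1 ≤ n + 1 := by simpa using ht
        omega
      rw [solutionAltGo]
      simp only [hdrop]
      rw [ih _ hlen hpr']
      by_cases hm0 : (rest.takeWhile (fun x => x == c)).length = 0
      · rw [hm0]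
        have hrr : rest = rest.dropWhile (fun x => x == c) := by
          conv_lhs => rw [hsplit, hm0]
          simp
        have hpc : ((c :: rest).count c == 1) = true := by simp [hcount_c, hm0]
        simp only [Nat.add_zero, BEq.rfl, if_pos]
        rw [List.filter_cons, hpc]
        rw [← hrr] at hfilter_r'
        rw [← hrr, hfilter_r']
        simp
      · have hk : ((1 + (rest.takeWhile (fun x => x == c)).length) == 1) = false := by
          rw [beq_eq_false_iff_ne]; omega
        rw [hk]
        simp only [Bool.false_eq_true, if_false]
        have hpc : ((c :: rest).count c == 1) = false := by
          rw [beq_eq_false_iff_ne, hcount_c]; omega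
        have hsplit2 : (c :: rest)
            = List.replicate (1 + (rest.takeWhile (fun x => x == c)).length) c
              ++ rest.dropWhile (fun x => x == c) := by
          rw [Nat.add_comm, List.replicate_succ, List.cons_append, ← hsplit]
        have hfl : ∀ (p : Char → Bool), p c = false →
            (c :: rest).filter p = (rest.dropWhile (fun x => x == c)).filter p := by
          intro p hpcf
          rw [hsplit2, List.filter_append, List.filter_replicate, hpcf]
          simp
        rw [hfl _ hpc, hfilter_r']

-- the common normal form of both programs: sorted characters of count 1
lemma solution_toList (s : String) :
    (solution s).toList
    = PySem.List.sorted (s.toList.filter (fun c => s.toList.count c == 1)) (fun x => x) false := by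
  simp only [solution]
  rw [PySem.Str.len_eq, PySem.List.pyRange_zero_natCast, List.foldl_map]
  have hfun : (fun (temp : List String) (i : Nat) =>
      if PySem.Str.count s (PySem.Str.slice s (some (i : Int)) (some ((i : Int) + 1))) == 1 then
        temp ++ [PySem.Str.slice s (some (i : Int)) (some ((i : Int) + 1))]
      else temp)
      = fun temp i =>
        if PySem.Chars.count s.toList ((s.toList.drop i).take 1) == 1 then
          temp ++ [String.ofList ((s.toList.drop i).take 1)]
        else temp := by
    funext temp i
    rw [str_slice_singleton, PySem.Str.count_eq, String.toList_ofList]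
  rw [hfun, foldA (fun l => PySem.Chars.count s.toList l == 1) String.ofList s.toList [],
    List.nil_append]
  have hpred : (fun c => PySem.Chars.count s.toList [c] == 1)
      = (fun c => s.toList.count c == 1) := funext fun c => by rw [chars_count_singleton]
  rw [hpred]
  have hnd : (PySem.List.sorted (s.toList.filter (fun c => s.toList.count c == 1))
      (fun x => x) false).Nodup := by
    refine (PySem.List.sorted_perm _ _ _).nodup_iff.mpr ?_
    refine List.nodup_iff_count.mpr ?_
    intro a
    have hsub : (s.toList.filter (fun c => s.toList.count c == 1)).count a
        ≤ s.toList.count a := List.Sublist.count_le a List.filter_sublist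
    by_cases hpa : (s.toList.count a == 1) = true
    · have : s.toList.count a = 1 := by simpa using hpa
      omega
    · have hnm : a ∉ s.toList.filter (fun c => s.toList.count c == 1) := by
        intro hmem
        exact hpa (List.mem_filter.mp hmem).2
      simp [List.count_eq_zero_of_not_mem hnm]
  have hlt : (PySem.List.sorted (s.toList.filter (fun c => s.toList.count c == 1))
      (fun x => x) false).Pairwise (· < ·) := by
    have hle := PySem.List.sorted_pairwise
      (s.toList.filter (fun c => s.toList.count c == 1)) (fun x => x)
    exact (hle.and hnd).imp fun h => lt_of_le_of_ne h.1 h.2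
  have hsorted : PySem.List.sorted
        ((s.toList.filter (fun c => s.toList.count c == 1)).map (fun c => String.ofList [c]))
        (fun x => x) false
      = (PySem.List.sorted (s.toList.filter (fun c => s.toList.count c == 1))
          (fun x => x) false).map (fun c => String.ofList [c]) := by
    apply PySem.List.sorted_id_eq_of_perm_of_pairwise
    · exact (PySem.List.sorted_perm _ _ _).map _
    · exact List.pairwise_map.mpr (hlt.imp fun h => le_of_lt (singleton_str_lt h))
  rw [hsorted, foldl_strAppend_toList]
  simp only [List.map_map, Function.comp_def, String.toList_ofList]
  simpa using flatten_map_singleton _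

lemma solution_alt_toList (s : String) :
    (solution_alt s).toList
    = PySem.List.sorted (s.toList.filter (fun c => s.toList.count c == 1)) (fun x => x) false := by
  simp only [solution_alt, String.toList_ofList]
  have hpw : (PySem.List.sorted s.toList (fun x => x) false).Pairwise (· ≤ ·) := by
    simpa using PySem.List.sorted_pairwise s.toList (fun x => x)
  rw [altGo_aux (PySem.List.sorted s.toList (fun x => x) false).length _ le_rfl hpw [],
    List.nil_append]
  have hperm : (PySem.List.sorted s.toList (fun x => x) false).Perm s.toList :=
    PySem.List.sorted_perm _ _ _
  have hcnt : (PySem.List.sorted s.toList (fun x => x) false).filter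
        (fun c => (PySem.List.sorted s.toList (fun x => x) false).count c == 1)
      = (PySem.List.sorted s.toList (fun x => x) false).filter
        (fun c => s.toList.count c == 1) := by
    apply List.filter_congr
    intro x _
    rw [hperm.count_eq]
  rw [hcnt]
  symm
  apply PySem.List.sorted_id_eq_of_perm_of_pairwise
  · exact hperm.filter _
  · exact hpw.sublist List.filter_sublist

-- ===== VERDICT (by name: the statement is the Claim_ definition above) =====
theorem solution_spec : Claim_equal_solution := by
  intro s _
  unfold Spec_solution
  apply String.toList_inj.mp
  rw [solution_toList, solution_alt_toList]
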